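-- pv_equiv track=rewrite | github.com/riyajaitly/Hangman | hangman.py | num_lives
-- ===== SOURCE A (Python) =====
-- def num_lives(p_initial_lives, p_word_lives):
--     l_lives = ""
--     nx = p_initial_lives - p_word_lives
--     for i in range(p_initial_lives):
--         if i < nx:
--             l_lives = l_lives + "X"
--         else:
--             l_lives = l_lives + "O"
--     return l_lives
-- ===== SOURCE B (Python) =====
-- def num_lives(p_initial_lives, p_word_lives):
--     total = max(0, p_initial_lives)
--     nx = min(max(0, p_initial_lives - p_word_lives), total)
--     return "X" * nx + "O" * (total - nx)
-- ===== Notes on version B (the rewrite author's own statement) =====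
-- stated objective: simpler
-- what changed: Replaces the per-index loop with branch-per-character by a closed-form construction: clamp the X-count into [0, total] and build the string with string repetition.
import Mathlib
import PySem

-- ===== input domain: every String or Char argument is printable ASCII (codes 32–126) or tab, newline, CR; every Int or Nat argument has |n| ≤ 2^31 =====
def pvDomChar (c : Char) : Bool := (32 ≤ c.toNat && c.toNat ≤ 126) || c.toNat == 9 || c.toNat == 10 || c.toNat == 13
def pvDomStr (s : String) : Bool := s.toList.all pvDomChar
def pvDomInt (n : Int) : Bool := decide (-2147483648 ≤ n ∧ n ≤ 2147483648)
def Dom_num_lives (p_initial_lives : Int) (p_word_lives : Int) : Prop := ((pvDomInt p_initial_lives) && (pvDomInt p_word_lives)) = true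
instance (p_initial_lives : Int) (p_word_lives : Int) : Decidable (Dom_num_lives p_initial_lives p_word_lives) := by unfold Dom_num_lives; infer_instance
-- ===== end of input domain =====

-- B builds the X-then-O string in closed form (clamped X-count + string repetition) instead of A's per-index loop; objective: simpler.


-- ===== PORT A =====
def num_lives (p_initial_lives : Int) (p_word_lives : Int) : String :=
  let nx := p_initial_lives - p_word_lives
  String.ofList ((PySem.List.pyRange 0 p_initial_lives 1).foldl
    (fun l_lives i => if i < nx then l_lives ++ ['X'] else l_lives ++ ['O']) [])

-- ===== PORT B =====
def num_lives_alt (p_initial_lives : Int) (p_word_lives : Int) : String :=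
  let total := max 0 p_initial_lives
  let nx := min (max 0 (p_initial_lives - p_word_lives)) total
  String.ofList (PySem.List.pyRepeat ['X'] nx ++ PySem.List.pyRepeat ['O'] (total - nx))

-- ===== PRECONDITION & SPEC =====
def Spec_num_lives (p_initial_lives : Int) (p_word_lives : Int) (out : String) : Prop := out = num_lives_alt p_initial_lives p_word_lives
instance (p_initial_lives : Int) (p_word_lives : Int) (out : String) : Decidable (Spec_num_lives p_initial_lives p_word_lives out) := by unfold Spec_num_lives; infer_instance

-- ===== CLAIM (what is proved, stated in full; the proofs are below) =====
def Claim_equal_num_lives : Prop := ∀ (p_initial_lives : Int) (p_word_lives : Int), Dom_num_lives p_initial_lives p_word_lives → Spec_num_lives p_initial_lives p_word_lives (num_lives p_initial_lives p_word_lives)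

-- ===== LEMMAS AND PROOFS =====

-- The range-indexed X/O string is X's up to the (clamped) threshold, then O's.
lemma range_map_xo (n : Nat) (t : Int) :
    (List.range n).map (fun k : Nat => if (k : Int) < t then 'X' else 'O')
      = List.replicate (min t.toNat n) 'X' ++ List.replicate (n - min t.toNat n) 'O' := by
  induction n with
  | zero => simp
  | succ n ih =>
    rw [List.range_succ, List.map_append, ih]
    by_cases h : (n : Int) < t
    · have h1 : min t.toNat (n + 1) = n + 1 := by omega
      have h2 : min t.toNat n = n := by omega
      simp [h, h2, List.replicate_succ' (n := n)]
    · have h1 : min t.toNat (n + 1) = min t.toNat n := by omega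
      have h2 : n + 1 - min t.toNat n = (n - min t.toNat n) + 1 := by omega
      simp only [List.map_cons, List.map_nil, if_neg h, h1, h2,
        List.replicate_succ' (n := n - min t.toNat n)]
      simp

theorem num_lives_spec_aux (p q : Int) :
    num_lives p q = num_lives_alt p q := by
  unfold num_lives num_lives_alt
  dsimp only
  have hfun : (fun (l : List Char) (i : Int) =>
        if i < p - q then l ++ ['X'] else l ++ ['O'])
      = fun l i => l ++ [if i < p - q then 'X' else 'O'] := by
    funext l i; split <;> rfl
  rw [hfun, PySem.List.foldl_append_singleton_eq_map, PySem.List.pyRange_one,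
    List.map_map]
  simp only [List.nil_append, PySem.List.pyRepeat_singleton, Function.comp_def,
    zero_add, sub_zero]
  rw [range_map_xo]
  have h1 : (min (max 0 (p - q)) (max 0 p)).toNat = min (p - q).toNat p.toNat := by
    omega
  have h2 : (max 0 p - min (max 0 (p - q)) (max 0 p)).toNat
      = p.toNat - min (p - q).toNat p.toNat := by omega
  rw [h1, h2]

-- ===== VERDICT (by name: the statement is the Claim_ definition above) =====
theorem num_lives_spec : Claim_equal_num_lives := by
  intro p q _
  exact num_lives_spec_aux p q
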